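-- pv_equiv track=rewrite | github.com/Aryudesu/ARC | 142/ARC142A.py | calc
-- ===== SOURCE A (Python) =====
-- def calc(K1, K2, N):
--     if K1 > K2:
--         return 0
--     res = 0
--     K1_ = K1
--     while K1 <= N:
--         K1 *= 10
--         res += 1
--     if K1_ != K2:
--         while K2 <= N:
--             K2 *= 10
--             res += 1
--     return res
-- ===== SOURCE B (Python) =====
-- def _steps(K, N):
--     # number of x10 multiplications needed for K to exceed N = digit count of N // K
--     return len(str(N // K)) if K <= N else 0
--
-- def calc(K1, K2, N):
--     if K1 > K2:
--         return 0
--     return _steps(K1, N) + (0 if K1 == K2 else _steps(K2, N))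
-- ===== Notes on version B (the rewrite author's own statement) =====
-- stated objective: simpler
-- what changed: Replaces both multiply-by-10-until-exceeding-N while-loops with a closed form: the step count for K is the decimal digit count len(str(N//K)) when K<=N, else 0.
import Mathlib
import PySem

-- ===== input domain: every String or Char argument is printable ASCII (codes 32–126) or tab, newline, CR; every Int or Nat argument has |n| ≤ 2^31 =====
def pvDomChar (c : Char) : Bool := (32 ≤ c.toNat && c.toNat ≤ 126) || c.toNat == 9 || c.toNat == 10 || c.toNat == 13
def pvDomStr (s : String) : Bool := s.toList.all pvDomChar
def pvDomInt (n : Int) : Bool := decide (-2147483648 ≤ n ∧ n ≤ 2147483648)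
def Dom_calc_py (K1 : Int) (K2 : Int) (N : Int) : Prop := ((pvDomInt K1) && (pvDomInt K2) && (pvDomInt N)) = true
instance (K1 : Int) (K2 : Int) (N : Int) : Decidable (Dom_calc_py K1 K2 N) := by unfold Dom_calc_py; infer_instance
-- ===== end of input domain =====

-- B replaces A's two multiply-by-10-until-exceeding-N while-loops with a closed form:
-- the step count for K is len(str(N // K)) when K <= N, else 0. Return values only; no side effects.

-- ===== PORT A =====
-- 'while K <= N: K *= 10; res += 1', written as 1 + recurse; the '0 < K' guard only makes the
-- computation total on inputs where the Python loop never ends (those lie outside Pre_calc_py).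
def calcLoopA (K N : Int) : Int :=
  if K ≤ N then
    (if h : 0 < K then calcLoopA (K * 10) N + 1 else 0)
  else 0
termination_by (N - K + 1).toNat
decreasing_by
  rename_i hKN
  have : K * 10 ≥ K + 9 := by nlinarith
  omega

def calc_py (K1 : Int) (K2 : Int) (N : Int) : Int :=
  if K1 > K2 then 0
  else
    let res := calcLoopA K1 N
    if K1 ≠ K2 then res + calcLoopA K2 N else res

-- ===== PORT B =====
-- _steps(K, N) = len(str(N // K)) if K <= N else 0
def stepsB (K N : Int) : Int :=
  if K ≤ N then PySem.Str.len (PySem.Int.toStr (PySem.Int.floordiv N K)) else 0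

def calc_py_alt (K1 : Int) (K2 : Int) (N : Int) : Int :=
  if K1 > K2 then 0
  else stepsB K1 N + (if K1 = K2 then 0 else stepsB K2 N)

-- ===== PRECONDITION & SPEC =====
-- Pre_ excludes exactly the inputs on which A never returns (its first while-loop runs forever:
-- K1 ≤ K2, K1 ≤ N and K1 ≤ 0, so K1 * 10 never exceeds N). A returns on every other input.
def Pre_calc_py (K1 : Int) (K2 : Int) (N : Int) : Prop := K2 < K1 ∨ 0 < K1 ∨ N < K1
instance (K1 : Int) (K2 : Int) (N : Int) : Decidable (Pre_calc_py K1 K2 N) := by unfold Pre_calc_py; infer_instance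
def pvWitness_calc_py : Int × Int × Int := (3, 70, 1000)

def Spec_calc_py (K1 : Int) (K2 : Int) (N : Int) (out : Int) : Prop := out = calc_py_alt K1 K2 N
instance (K1 : Int) (K2 : Int) (N : Int) (out : Int) : Decidable (Spec_calc_py K1 K2 N out) := by unfold Spec_calc_py; infer_instance

-- ===== CLAIM (what is proved, stated in full; the proofs are below) =====
def Claim_equal_calc_py : Prop := ∀ (K1 : Int) (K2 : Int) (N : Int), Dom_calc_py K1 K2 N → Pre_calc_py K1 K2 N → Spec_calc_py K1 K2 N (calc_py K1 K2 N)

-- ===== LEMMAS AND PROOFS =====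

-- decimal digit count of a natural number: the recursion both ports reduce to
def dcount (m : Nat) : Nat :=
  if m < 10 then 1 else dcount (m / 10) + 1
decreasing_by omega

lemma tdcore_len : ∀ f m, m < f → (Nat.toDigitsCore 10 f m []).length = dcount m := by
  intro f
  induction f with
  | zero => intro m hm; omega
  | succ f ih =>
    intro m hm
    rw [Nat.toDigitsCore]
    by_cases h : m / 10 = 0
    · simp only [h]
      rw [dcount, if_pos (show m < 10 by omega)]
      rfl
    · simp only [h]
      rw [if_neg (by simp), Nat.toDigitsCore_lens_eq, ih (m / 10) (by omega)]
      conv_rhs => rw [dcount]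
      rw [if_neg (show ¬ m < 10 by omega)]

lemma toChars_len (q : Int) (hq : 0 ≤ q) :
    (PySem.Int.toChars q).length = dcount q.toNat := by
  rw [PySem.Int.toChars]
  simp only [if_neg (show ¬ q < 0 by omega)]
  rw [Nat.toDigits]
  exact tdcore_len _ _ (by omega)

lemma loop_aux (N : Int) : ∀ q : Nat, ∀ K : Int, 0 < K → K ≤ N → (N / K).toNat = q →
    calcLoopA K N = (dcount q : Int) := by
  intro q
  induction q using Nat.strong_induction_on with
  | _ q ih =>
    intro K hK hKN hq
    rw [calcLoopA, if_pos hKN, dif_pos hK]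
    have hq1 : (1 : Int) ≤ N / K := (Int.le_ediv_iff_mul_le hK).mpr (by linarith)
    by_cases h10 : K * 10 ≤ N
    · have h1 : (10 : Int) ≤ N / K := (Int.le_ediv_iff_mul_le hK).mpr (by linarith)
      have hdd : N / (K * 10) = (N / K) / 10 := (Int.ediv_ediv_eq_ediv_mul (by omega)).symm
      rw [ih (q / 10) (by omega) (K * 10) (by positivity) h10 (by omega)]
      conv_rhs => rw [dcount]
      rw [if_neg (show ¬ q < 10 by omega)]
      push_cast
      ring
    · have h1 : ¬ (10 : Int) ≤ N / K := fun hc =>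
        h10 (by have := (Int.le_ediv_iff_mul_le hK).mp hc; linarith)
      rw [calcLoopA, if_neg h10]
      rw [dcount, if_pos (show q < 10 by omega)]
      rfl

lemma stepsB_pos (K N : Int) (hK : 0 < K) (hKN : K ≤ N) :
    stepsB K N = (dcount (N / K).toNat : Int) := by
  have hf : N.fdiv K = N / K := by
    rw [Int.fdiv_eq_ediv]; simp [show (0:Int) ≤ K by omega]
  rw [stepsB, if_pos hKN, PySem.Int.toStr, PySem.Int.floordiv, hf, PySem.Str.len_eq]
  congr 1
  rw [String.toList_ofList]
  exact toChars_len _ (Int.ediv_nonneg (by omega) (by omega))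

lemma loop_eq_steps (K N : Int) (hK : 0 < K) : calcLoopA K N = stepsB K N := by
  by_cases hKN : K ≤ N
  · rw [loop_aux N (N / K).toNat K hK hKN rfl, stepsB_pos K N hK hKN]
  · rw [calcLoopA, if_neg hKN, stepsB, if_neg hKN]

-- ===== VERDICT (by name: the statement is the Claim_ definition above) =====
theorem calc_py_spec : Claim_equal_calc_py := by
  intro K1 K2 N _ hpre
  unfold Spec_calc_py
  rw [calc_py, calc_py_alt]
  by_cases hgt : K1 > K2
  · rw [if_pos hgt, if_pos hgt]
  · rw [if_neg hgt, if_neg hgt]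
    have hK12 : K1 ≤ K2 := by omega
    rcases hpre with h | h | h
    · omega
    · rw [loop_eq_steps K1 N h]
      by_cases heq : K1 = K2
      · simp [heq]
      · simp only [ne_eq, heq, not_false_eq_true, if_pos, if_neg]
        rw [loop_eq_steps K2 N (by omega)]
    · have z1 : calcLoopA K1 N = 0 := by rw [calcLoopA, if_neg (by omega)]
      have z2 : calcLoopA K2 N = 0 := by rw [calcLoopA, if_neg (by omega)]
      have s1 : stepsB K1 N = 0 := by rw [stepsB, if_neg (by omega)]
      have s2 : stepsB K2 N = 0 := by rw [stepsB, if_neg (by omega)]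
      by_cases heq : K1 = K2 <;> simp [heq, z1, z2, s1, s2]
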